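-- pv_equiv track=rewrite | github.com/nmallar/scaler | hashing/assignments/9diffk.py | diffPossible2
-- ===== SOURCE A (Python) =====
-- def diffPossible2(A,B):
--
--     dict=set()
--     for i in range(len(A)):
--         a=A[i]
--         ans1=A[i]-B
--         ans2=A[i]+B
--         if ans1 in dict or ans2 in dict:
--
--             return 1
--         else:
--
--             dict.add(a)
--     return 0
-- ===== SOURCE B (Python) =====
-- def diffPossible2(A, B):
--     k = abs(B)
--     count = {}
--     for x in A:
--         count[x] = count.get(x, 0) + 1
--     for x in count:
--         if k == 0:
--             if count[x] > 1:
--                 return 1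
--         elif x + k in count:
--             return 1
--     return 0
-- ===== Notes on version B (the rewrite author's own statement) =====
-- stated objective: alternative
-- what changed: Replaces the incremental seen-set scan (checking each element against earlier ones) with a two-pass counter: build a full value->count dict, then scan its distinct keys once, detecting a duplicate when B==0 and a key x with x+|B| also a key otherwise.
import Mathlib
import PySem

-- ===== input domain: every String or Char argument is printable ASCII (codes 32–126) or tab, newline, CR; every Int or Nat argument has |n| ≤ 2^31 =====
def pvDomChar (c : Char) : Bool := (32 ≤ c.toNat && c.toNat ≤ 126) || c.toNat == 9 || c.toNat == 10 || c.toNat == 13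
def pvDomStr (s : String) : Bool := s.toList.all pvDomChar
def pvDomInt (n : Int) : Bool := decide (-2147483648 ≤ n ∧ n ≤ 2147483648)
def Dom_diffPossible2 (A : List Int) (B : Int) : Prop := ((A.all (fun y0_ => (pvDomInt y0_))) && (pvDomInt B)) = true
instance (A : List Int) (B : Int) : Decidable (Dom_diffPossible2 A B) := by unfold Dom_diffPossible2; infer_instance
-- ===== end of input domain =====

-- B replaces A's incremental seen-set scan by a two-pass counter (full count dict, then a
-- scan of its distinct keys); same O(n) cost, alternative structure.

-- ===== PORT A =====
-- A's loop 'for i in range(len(A)): a = A[i]; …' visits the elements in order; the obvious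
-- structural recursion over the list carrying the seen set.
def dp2LoopA (B : Int) : List Int → PySem.Set Int → Int
  | [], _ => 0
  | a :: rest, s =>
    if PySem.Set.contains s (a - B) || PySem.Set.contains s (a + B) then 1
    else dp2LoopA B rest (PySem.Set.add s a)

def diffPossible2 (A : List Int) (B : Int) : Int :=
  dp2LoopA B A PySem.Set.empty

-- ===== PORT B =====
-- second loop of Source B: scan the dict's keys (insertion order), early return 1 on a hit
def dp2AltCheck (count : PySem.Dict Int Int) (k : Int) : List Int → Int
  | [] => 0
  | x :: rest =>
    if k = 0 then
      if count.getD x 0 > 1 then 1 else dp2AltCheck count k rest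
    else if count.contains (x + k) then 1
    else dp2AltCheck count k rest

def diffPossible2_alt (A : List Int) (B : Int) : Int :=
  let k := |B|
  let count := A.foldl (fun d x => d.insert x (d.getD x 0 + 1)) PySem.Dict.empty
  dp2AltCheck count k count.keys

-- ===== PRECONDITION & SPEC =====
def Spec_diffPossible2 (A : List Int) (B : Int) (out : Int) : Prop := out = diffPossible2_alt A B
instance (A : List Int) (B : Int) (out : Int) : Decidable (Spec_diffPossible2 A B out) := by unfold Spec_diffPossible2; infer_instance

-- ===== CLAIM (what is proved, stated in full; the proofs are below) =====
def Claim_equal_diffPossible2 : Prop := ∀ (A : List Int) (B : Int), Dom_diffPossible2 A B → Spec_diffPossible2 A B (diffPossible2 A B)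

-- ===== LEMMAS AND PROOFS =====

-- pair existence, recursively: some element has a partner at distance B (either sign) later on
def dp2Good (B : Int) : List Int → Prop
  | [] => False
  | a :: t => (∃ b ∈ t, b = a - B ∨ b = a + B) ∨ dp2Good B t

lemma dp2LoopA_zero_or_one (B : Int) (l : List Int) (s : PySem.Set Int) :
    dp2LoopA B l s = 0 ∨ dp2LoopA B l s = 1 := by
  induction l generalizing s with
  | nil => left; rfl
  | cons a t ih =>
    simp only [dp2LoopA]
    split
    · right; rfl
    · exact ih _

lemma dp2AltCheck_zero_or_one (c : PySem.Dict Int Int) (k : Int) (l : List Int) :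
    dp2AltCheck c k l = 0 ∨ dp2AltCheck c k l = 1 := by
  induction l with
  | nil => left; rfl
  | cons a t ih =>
    simp only [dp2AltCheck]
    split_ifs <;> simp [ih]

lemma dp2LoopA_eq_one_iff (B : Int) (l : List Int) (s : PySem.Set Int) :
    dp2LoopA B l s = 1 ↔ (∃ a ∈ l, (a - B) ∈ s ∨ (a + B) ∈ s) ∨ dp2Good B l := by
  induction l generalizing s with
  | nil => simp [dp2LoopA, dp2Good]
  | cons a t ih =>
    simp only [dp2LoopA]
    split
    · rename_i h
      simp only [Bool.or_eq_true, PySem.Set.contains_iff] at h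
      simp only [List.mem_cons, true_iff]
      exact Or.inl ⟨a, Or.inl rfl, h⟩
    · rename_i h
      simp only [Bool.or_eq_true, PySem.Set.contains_iff, not_or] at h
      rw [ih]
      simp only [dp2Good]
      constructor
      · rintro (⟨c, hc, hm⟩ | hg)
        · simp only [PySem.Set.mem_add] at hm
          rcases hm with (hm | hm) | (hm | hm)
          · exact Or.inl ⟨c, List.mem_cons_of_mem _ hc, Or.inl hm⟩
          · exact Or.inr (Or.inl ⟨c, hc, Or.inr (by omega)⟩)
          · exact Or.inl ⟨c, List.mem_cons_of_mem _ hc, Or.inr hm⟩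
          · exact Or.inr (Or.inl ⟨c, hc, Or.inl (by omega)⟩)
        · exact Or.inr (Or.inr hg)
      · rintro (⟨c, hc, hm⟩ | (⟨b, hb, hbe⟩ | hg))
        · rcases List.mem_cons.1 hc with rfl | hc
          · exfalso
            rcases hm with hm | hm
            · exact absurd ((PySem.Set.contains_iff _ _).2 hm) (by simp [h.1])
            · exact absurd ((PySem.Set.contains_iff _ _).2 hm) (by simp [h.2])
          · exact Or.inl ⟨c, hc, by
              rcases hm with hm | hm
              · exact Or.inl ((PySem.Set.mem_add _ _ _).2 (Or.inl hm))
              · exact Or.inr ((PySem.Set.mem_add _ _ _).2 (Or.inl hm))⟩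
        · refine Or.inl ⟨b, hb, ?_⟩
          rcases hbe with rfl | rfl
          · exact Or.inr ((PySem.Set.mem_add _ _ _).2 (Or.inr (by omega)))
          · exact Or.inl ((PySem.Set.mem_add _ _ _).2 (Or.inr (by omega)))
        · exact Or.inr hg

lemma dp2Good_neg (B : Int) (l : List Int) : dp2Good (-B) l ↔ dp2Good B l := by
  induction l with
  | nil => simp [dp2Good]
  | cons a t ih =>
    simp only [dp2Good, ih]
    constructor
    · rintro (⟨b, hb, he⟩ | h)
      · exact Or.inl ⟨b, hb, by omega⟩
      · exact Or.inr h
    · rintro (⟨b, hb, he⟩ | h)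
      · exact Or.inl ⟨b, hb, by omega⟩
      · exact Or.inr h

lemma dp2Good_abs (B : Int) (l : List Int) : dp2Good |B| l ↔ dp2Good B l := by
  rcases abs_choice B with h | h
  · rw [h]
  · rw [h, dp2Good_neg]

lemma dp2Good_zero_iff (l : List Int) : dp2Good 0 l ↔ ∃ x ∈ l, 2 ≤ l.count x := by
  induction l with
  | nil => simp [dp2Good]
  | cons a t ih =>
    simp only [dp2Good, ih]
    constructor
    · rintro (⟨b, hb, he⟩ | ⟨x, hx, hc⟩)
      · refine ⟨a, List.mem_cons_self, ?_⟩
        have : b = a := by omega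
        subst this
        have : 1 ≤ t.count b := List.one_le_count_iff.2 hb
        simp [List.count_cons_self]; omega
      · exact ⟨x, List.mem_cons_of_mem _ hx, le_trans hc List.count_le_count_cons⟩
    · rintro ⟨x, hx, hc⟩
      by_cases hxa : x = a
      · subst hxa
        rw [List.count_cons_self] at hc
        have h1 : 1 ≤ t.count x := by omega
        exact Or.inl ⟨x, List.one_le_count_iff.1 h1, Or.inl (by omega)⟩
      · have hx' : x ∈ t := by
          rcases List.mem_cons.1 hx with h | h
          · exact absurd h hxa
          · exact h
        have hc' : 2 ≤ t.count x := by
          simpa [List.count_cons, hxa, Ne.symm hxa] using hc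
        exact Or.inr ⟨x, hx', hc'⟩

lemma dp2Good_ne_zero_iff (k : Int) (hk : k ≠ 0) (l : List Int) :
    dp2Good k l ↔ ∃ x ∈ l, x + k ∈ l := by
  induction l with
  | nil => simp [dp2Good]
  | cons a t ih =>
    simp only [dp2Good, ih]
    constructor
    · rintro (⟨b, hb, he⟩ | ⟨x, hx, hxk⟩)
      · rcases he with he | he
        · refine ⟨b, List.mem_cons_of_mem _ hb, ?_⟩
          have hba : b + k = a := by omega
          rw [hba]; exact List.mem_cons_self
        · refine ⟨a, List.mem_cons_self, List.mem_cons_of_mem _ ?_⟩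
          rwa [← he]
      · exact ⟨x, List.mem_cons_of_mem _ hx, List.mem_cons_of_mem _ hxk⟩
    · rintro ⟨x, hx, hxk⟩
      rcases List.mem_cons.1 hx with rfl | hx
      · have : x + k ∈ t := by
          rcases List.mem_cons.1 hxk with h | h
          · omega
          · exact h
        exact Or.inl ⟨x + k, this, Or.inr rfl⟩
      · rcases List.mem_cons.1 hxk with h | h
        · exact Or.inl ⟨x, hx, Or.inl (by omega)⟩
        · exact Or.inr ⟨x, hx, h⟩

lemma dp2AltCheck_eq_one_iff_zero (c : PySem.Dict Int Int) (l : List Int) :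
    dp2AltCheck c 0 l = 1 ↔ ∃ x ∈ l, c.getD x 0 > 1 := by
  induction l with
  | nil => simp [dp2AltCheck]
  | cons a t ih =>
    simp only [dp2AltCheck]
    by_cases h : c.getD a 0 > 1
    · rw [if_pos h]
      exact iff_of_true rfl ⟨a, List.mem_cons_self, h⟩
    · rw [if_neg h]; simp only [if_true]; rw [ih]
      constructor
      · rintro ⟨x, hx, hc⟩
        exact ⟨x, List.mem_cons_of_mem _ hx, hc⟩
      · rintro ⟨x, hx, hc⟩
        rcases List.mem_cons.1 hx with rfl | hx
        · exact absurd hc h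
        · exact ⟨x, hx, hc⟩

lemma dp2AltCheck_eq_one_iff_ne (c : PySem.Dict Int Int) (k : Int) (hk : k ≠ 0) (l : List Int) :
    dp2AltCheck c k l = 1 ↔ ∃ x ∈ l, c.contains (x + k) = true := by
  induction l with
  | nil => simp [dp2AltCheck]
  | cons a t ih =>
    simp only [dp2AltCheck, if_neg hk]
    by_cases h : c.contains (a + k) = true
    · rw [if_pos h]
      exact iff_of_true rfl ⟨a, List.mem_cons_self, h⟩
    · rw [if_neg h, ih]
      constructor
      · rintro ⟨x, hx, hc⟩
        exact ⟨x, List.mem_cons_of_mem _ hx, hc⟩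
      · rintro ⟨x, hx, hc⟩
        rcases List.mem_cons.1 hx with rfl | hx
        · exact absurd hc h
        · exact ⟨x, hx, hc⟩

lemma dp2_alt_eq_one_iff (A : List Int) (B : Int) :
    diffPossible2_alt A B = 1 ↔ dp2Good B A := by
  unfold diffPossible2_alt
  simp only [PySem.Dict.foldl_insert_getD_add_one_eq_counter]
  rw [← dp2Good_abs B A]
  by_cases hB : |B| = 0
  · rw [hB, dp2AltCheck_eq_one_iff_zero, dp2Good_zero_iff]
    constructor
    · rintro ⟨x, hx, hc⟩
      rw [PySem.Dict.keys_counter] at hx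
      rw [PySem.Dict.getD_counter] at hc
      exact ⟨x, (PySem.Set.mem_ofList _ _).1 hx, by exact_mod_cast hc⟩
    · rintro ⟨x, hx, hc⟩
      refine ⟨x, ?_, ?_⟩
      · rw [PySem.Dict.keys_counter]; exact (PySem.Set.mem_ofList _ _).2 hx
      · rw [PySem.Dict.getD_counter]; exact_mod_cast hc
  · rw [dp2AltCheck_eq_one_iff_ne _ _ hB, dp2Good_ne_zero_iff _ hB]
    constructor
    · rintro ⟨x, hx, hc⟩
      rw [PySem.Dict.keys_counter] at hx
      rw [PySem.Dict.contains_counter] at hc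
      exact ⟨x, (PySem.Set.mem_ofList _ _).1 hx, by simpa using hc⟩
    · rintro ⟨x, hx, hc⟩
      refine ⟨x, ?_, ?_⟩
      · rw [PySem.Dict.keys_counter]; exact (PySem.Set.mem_ofList _ _).2 hx
      · rw [PySem.Dict.contains_counter]; simpa using hc

lemma dp2_a_eq_one_iff (A : List Int) (B : Int) :
    diffPossible2 A B = 1 ↔ dp2Good B A := by
  unfold diffPossible2
  rw [dp2LoopA_eq_one_iff]
  constructor
  · rintro (⟨a, _, hm⟩ | hg)
    · exfalso
      rcases hm with hm | hm <;> exact (List.not_mem_nil hm)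
    · exact hg
  · exact Or.inr

-- ===== VERDICT (by name: the statement is the Claim_ definition above) =====
theorem diffPossible2_spec : Claim_equal_diffPossible2 := by
  intro A B _
  unfold Spec_diffPossible2
  rcases dp2LoopA_zero_or_one B A PySem.Set.empty with ha | ha
  · have ha' : diffPossible2 A B = 0 := ha
    have hg : ¬ dp2Good B A := by
      intro hgood
      have := (dp2_a_eq_one_iff A B).2 hgood
      rw [ha'] at this; exact absurd this (by norm_num)
    have hb : diffPossible2_alt A B ≠ 1 := fun h => hg ((dp2_alt_eq_one_iff A B).1 h)
    have : diffPossible2_alt A B = 0 ∨ diffPossible2_alt A B = 1 := by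
      unfold diffPossible2_alt
      exact dp2AltCheck_zero_or_one _ _ _
    rcases this with h | h
    · rw [ha', h]
    · exact absurd h hb
  · have ha' : diffPossible2 A B = 1 := ha
    have hg : dp2Good B A := (dp2_a_eq_one_iff A B).1 ha'
    rw [ha', (dp2_alt_eq_one_iff A B).2 hg]
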